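-- pv_equiv track=rewrite | github.com/DanielMagen/University-exercises | Into_to_CS_2017_2018/ex4/hangman.py | choose_letter
-- ===== SOURCE A (Python) =====
-- CHAR_A = 97
--
-- def letter_to_index(letter):
--     """
--     receives a lower case letter and converts it into a number between 0-25
--     """
--     return ord(letter.lower()) - CHAR_A
--
-- def index_to_letter(index):
--     """
--     receives a number between 0-25  and converts it into a lower case letter
--     between a-z
--     """
--     return chr(index + CHAR_A)
--
-- def choose_letter(words, pattern):
--     """
--     receives a list of words and a pattern
--     returns the letter that is both
--     - most frequent in the given word list
--     - does not appear in the given pattern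
--     """
--
--     NUMBER_OF_LETTERS_IN_ALPHABET = 26
--     letters_popularity = [[i, 0] for i in range(NUMBER_OF_LETTERS_IN_ALPHABET)]
--
--     for word in words:
--         for character in word:
--             letters_popularity[letter_to_index(character)][1] += 1
--
--     letters_popularity = sorted(letters_popularity,
--                                 key=lambda lst: lst[1],
--                                 reverse=True)
--
--     for lst in letters_popularity:
--         character = index_to_letter(lst[0])
--         if not character in pattern:
--             return character
-- ===== SOURCE B (Python) =====
-- CHAR_A = 97
--
-- def letter_to_index(letter):
--     return ord(letter.lower()) - CHAR_A
--
-- def index_to_letter(index):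
--     return chr(index + CHAR_A)
--
-- def choose_letter(words, pattern):
--     counts = [0] * 26
--     for word in words:
--         for character in word:
--             counts[letter_to_index(character)] += 1
--     best = None
--     for i in range(26):
--         if index_to_letter(i) not in pattern and (best is None or counts[i] > counts[best]):
--             best = i
--     if best is not None:
--         return index_to_letter(best)
-- ===== Notes on version B (the rewrite author's own statement) =====
-- stated objective: simpler
-- what changed: Keeps the same nested counting loop over a 26-slot counter list but replaces A's sort-the-26-pair-table-then-scan selection with a single linear pass over indices 0..25 that tracks the best not-in-pattern letter with a strict '>' comparison (reproducing the stable descending sort's smallest-index tie-break).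
import Mathlib
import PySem

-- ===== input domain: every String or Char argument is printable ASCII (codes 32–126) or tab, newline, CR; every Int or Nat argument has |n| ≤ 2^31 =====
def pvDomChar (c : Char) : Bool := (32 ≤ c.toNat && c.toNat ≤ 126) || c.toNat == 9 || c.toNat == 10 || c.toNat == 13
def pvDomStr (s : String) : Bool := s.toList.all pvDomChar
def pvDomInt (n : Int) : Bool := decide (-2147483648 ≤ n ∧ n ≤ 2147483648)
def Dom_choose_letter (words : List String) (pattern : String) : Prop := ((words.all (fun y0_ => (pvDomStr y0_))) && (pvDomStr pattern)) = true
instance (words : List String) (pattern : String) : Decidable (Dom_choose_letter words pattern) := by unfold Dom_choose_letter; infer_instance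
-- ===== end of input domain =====

-- B keeps A's counting loop but replaces the sort-the-table-and-scan selection by one linear
-- max-scan over the 26 counters (strict '>' keeps the stable sort's smallest-index tie-break).

-- ===== PORT A =====
-- CHAR_A = 97
def pvCharA : Int := 97

-- letter_to_index: ord(letter.lower()) - CHAR_A  (str.lower of the single char = PySem.Chars.lowerChar)
def letter_to_index (c : Char) : Int := ((PySem.Chars.lowerChar c).toNat : Int) - pvCharA

-- index_to_letter: chr(index + CHAR_A)  (every index either port feeds it is 0..25)
def index_to_letter (i : Int) : Char := Char.ofNat (i + pvCharA).toNat

-- letters_popularity[letter_to_index(character)][1] += 1  (the 2-element inner list is a pair)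
def pvStepA (tbl : List (Int × Int)) (c : Char) : List (Int × Int) :=
  let i := letter_to_index c
  let p := PySem.List.pyGetD tbl i ((0 : Int), (0 : Int))
  PySem.List.pySetD tbl i (p.1, p.2 + 1)

-- the final 'for lst in letters_popularity: … return character' loop ("" = the None fall-through, excluded by Pre_)
def pvScanA (pattern : String) : List (Int × Int) → String
  | [] => ""
  | p :: rest =>
      let ch := index_to_letter p.1
      if !(PySem.Str.isIn (String.ofList [ch]) pattern) then String.ofList [ch]
      else pvScanA pattern rest

def choose_letter (words : List String) (pattern : String) : String :=
  let init := (PySem.List.pyRange 0 26 1).map (fun i => (i, (0 : Int)))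
  let tbl := words.foldl (fun t w => w.toList.foldl pvStepA t) init
  pvScanA pattern (PySem.List.sorted tbl (fun p => p.2) true)

-- ===== PORT B =====
-- counts[letter_to_index(character)] += 1
def pvStepB (counts : List Int) (c : Char) : List Int :=
  let i := letter_to_index c
  PySem.List.pySetD counts i (PySem.List.pyGetD counts i 0 + 1)

-- if index_to_letter(i) not in pattern and (best is None or counts[i] > counts[best]): best = i
def pvStepSel (counts : List Int) (pattern : String) (best : Option Int) (i : Int) : Option Int :=
  if !(PySem.Str.isIn (String.ofList [index_to_letter i]) pattern) &&
     (match best with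
      | none => true
      | some b => decide (PySem.List.pyGetD counts b 0 < PySem.List.pyGetD counts i 0))
  then some i else best

def choose_letter_alt (words : List String) (pattern : String) : String :=
  let counts := words.foldl (fun t w => w.toList.foldl pvStepB t) (PySem.List.pyRepeat [(0 : Int)] 26)
  match (PySem.List.pyRange 0 26 1).foldl (pvStepSel counts pattern) none with
  | some b => String.ofList [index_to_letter b]
  | none => ""

-- ===== PRECONDITION & SPEC =====
-- Pre_ excludes exactly the inputs on which the Python A does not return a string: a word
-- character whose lowered code is outside 71..122 makes letters_popularity[...] raise
-- IndexError, and a pattern containing all 26 letters makes A fall through and return None.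
def Pre_choose_letter (words : List String) (pattern : String) : Prop :=
  ((words.all fun w => w.toList.all fun c =>
      decide (71 ≤ (if 65 ≤ c.toNat && c.toNat ≤ 90 then c.toNat + 32 else c.toNat)) &&
      decide ((if 65 ≤ c.toNat && c.toNat ≤ 90 then c.toNat + 32 else c.toNat) ≤ 122))
   && ("abcdefghijklmnopqrstuvwxyz".toList.any fun c => !(pattern.toList.contains c))) = true
instance (words : List String) (pattern : String) : Decidable (Pre_choose_letter words pattern) := by
  unfold Pre_choose_letter; infer_instance

def pvWitness_choose_letter : List String × String := (["hello"], "le")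

def Spec_choose_letter (words : List String) (pattern : String) (out : String) : Prop := out = choose_letter_alt words pattern
instance (words : List String) (pattern : String) (out : String) : Decidable (Spec_choose_letter words pattern out) := by unfold Spec_choose_letter; infer_instance

-- ===== CLAIM (what is proved, stated in full; the proofs are below) =====
def Claim_equal_choose_letter : Prop := ∀ (words : List String) (pattern : String), Dom_choose_letter words pattern → Pre_choose_letter words pattern → Spec_choose_letter words pattern (choose_letter words pattern)

-- ===== LEMMAS AND PROOFS =====

-- the per-index predicate both selections test
def pvP (pattern : String) (p : Int × Int) : Bool :=
  !(PySem.Str.isIn (String.ofList [index_to_letter p.1]) pattern)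

-- 'is x a new maximum w.r.t. the accumulator' — shared by the two selection-fold statements
def pvTest {α : Type} (key : α → Int) (acc : Option α) (x : α) : Bool :=
  match acc with | none => true | some r => decide (key r < key x)

-- A's pair table is the enumerated view of B's counter list
def pvRel (tbl : List (Int × Int)) (counts : List Int) : Prop :=
  counts.length = 26 ∧ tbl = (List.range 26).map (fun (i : Nat) => ((i : Int), counts.getD i 0))

theorem pvIdx_lt {n : Nat} {idx : Int} {k : Nat} (h : PySem.List.pyIdx? n idx = some k) : k < n := by
  simp only [PySem.List.pyIdx?] at h
  split_ifs at h <;> simp_all <;> omega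

theorem pvSet_some {α : Type} (xs : List α) (idx : Int) (k : Nat)
    (hk : PySem.List.pyIdx? xs.length idx = some k) (v : α) :
    PySem.List.pySetD xs idx v = xs.set k v := by
  simp [PySem.List.pySetD, PySem.List.pySet?, hk]

theorem pvGet_some {α : Type} (xs : List α) (idx : Int) (k : Nat)
    (hk : PySem.List.pyIdx? xs.length idx = some k) (d : α) :
    PySem.List.pyGetD xs idx d = xs.getD k d := by
  simp [PySem.List.pyGetD, PySem.List.pyGet?, hk, List.getD]

theorem pvSet_none {α : Type} (xs : List α) (idx : Int)
    (hk : PySem.List.pyIdx? xs.length idx = none) (v : α) :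
    PySem.List.pySetD xs idx v = xs := by
  simp [PySem.List.pySetD, PySem.List.pySet?, hk]

-- one character: both counting steps stay in sync (also when the index is out of range)
theorem pvRel_step (tbl : List (Int × Int)) (counts : List Int) (c : Char)
    (h : pvRel tbl counts) : pvRel (pvStepA tbl c) (pvStepB counts c) := by
  obtain ⟨hlen, htbl⟩ := h
  have hlt : tbl.length = 26 := by simp [htbl]
  set idx := letter_to_index c with hidx
  cases hk : PySem.List.pyIdx? 26 idx with
  | none =>
    have hkA : PySem.List.pyIdx? tbl.length idx = none := by rw [hlt]; exact hk
    have hkB : PySem.List.pyIdx? counts.length idx = none := by rw [hlen]; exact hk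
    constructor
    · simp [pvStepB, hlen]
    · simp only [pvStepA, pvStepB]
      rw [pvSet_none tbl idx hkA, pvSet_none counts idx hkB]
      exact htbl
  | some k =>
    have hklt : k < 26 := pvIdx_lt hk
    have hkA : PySem.List.pyIdx? tbl.length idx = some k := by rw [hlt]; exact hk
    have hkB : PySem.List.pyIdx? counts.length idx = some k := by rw [hlen]; exact hk
    have hgB : PySem.List.pyGetD counts idx 0 = counts.getD k 0 := pvGet_some counts idx k hkB 0
    have hgA : PySem.List.pyGetD tbl idx ((0:Int),(0:Int)) = ((k : Int), counts.getD k 0) := by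
      rw [pvGet_some tbl idx k hkA, htbl]
      rw [List.getD_eq_getElem _ _ (by simp [hklt])]
      simp
    constructor
    · simp [pvStepB, hlen]
    · simp only [pvStepA, pvStepB]
      rw [hgA, pvSet_some tbl idx k hkA, hgB, pvSet_some counts idx k hkB]
      apply List.ext_getElem
      · simp [htbl]
      · intro j hj1 hj2
        simp only [htbl, List.getElem_set, List.getElem_map, List.getElem_range]
        have hj : j < 26 := by simpa using hj2
        by_cases hjk : k = j
        · subst hjk
          rw [List.getD_eq_getElem _ _ (by simp [hlen, hklt] : k < (counts.set k (counts.getD k 0 + 1)).length)]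
          simp
        · simp only [if_neg hjk]
          congr 1
          rw [List.getD_eq_getElem _ _ (by simp [hlen, hj]),
              List.getD_eq_getElem _ _ (by simp [hlen, hj] : j < (counts.set k (counts.getD k 0 + 1)).length)]
          simp [hjk]

theorem pvRel_foldChars (cs : List Char) : ∀ tbl counts, pvRel tbl counts →
    pvRel (cs.foldl pvStepA tbl) (cs.foldl pvStepB counts) := by
  induction cs with
  | nil => intro t c h; exact h
  | cons x cs ih => intro t c h; exact ih _ _ (pvRel_step t c x h)

theorem pvRel_foldWords (words : List String) : ∀ tbl counts, pvRel tbl counts →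
    pvRel (words.foldl (fun t w => w.toList.foldl pvStepA t) tbl)
          (words.foldl (fun t w => w.toList.foldl pvStepB t) counts) := by
  induction words with
  | nil => intro t c h; exact h
  | cons w ws ih => intro t c h; exact ih _ _ (pvRel_foldChars w.toList t c h)

theorem pvRel_init :
    pvRel ((PySem.List.pyRange 0 26 1).map (fun i => (i, (0 : Int))))
          (PySem.List.pyRepeat [(0 : Int)] 26) := by
  constructor
  · decide
  · decide

-- first P-element of an insertBy result, non-matching inserted element
theorem pvFind_insertBy_neg {α : Type} (before : α → α → Bool) (P : α → Bool) (x : α)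
    (hx : P x = false) (ys : List α) :
    (PySem.List.insertBy before x ys).find? P = ys.find? P := by
  induction ys with
  | nil => simp [PySem.List.insertBy, List.find?, hx]
  | cons y t ih =>
    by_cases h : before x y = true
    · simp [PySem.List.insertBy, h, List.find?, hx]
    · simp only [PySem.List.insertBy, Bool.not_eq_true] at h ⊢
      simp [h, List.find?]
      cases hy : P y <;> simp [ih]

-- first P-element of an insertBy result, matching inserted element, list sorted descending
theorem pvFind_insertBy_pos {α : Type} (key : α → Int) (P : α → Bool) (x : α)
    (hx : P x = true) (ys : List α) (hs : ys.Pairwise (fun a b => key b ≤ key a)) :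
    (PySem.List.insertBy (fun a b => decide (key b < key a)) x ys).find? P =
      match ys.find? P with
      | none => some x
      | some r => if key r < key x then some x else some r := by
  induction ys with
  | nil => simp [PySem.List.insertBy, List.find?, hx]
  | cons y t ih =>
    rcases List.pairwise_cons.mp hs with ⟨hy, ht⟩
    by_cases h : key y < key x
    · simp only [PySem.List.insertBy, decide_eq_true_eq, if_pos h]
      rw [List.find?_cons_of_pos (h := hx)]
      cases hr : List.find? P (y :: t) with
      | none => rfl
      | some r =>
        have hrm : r ∈ y :: t := List.mem_of_find?_eq_some hr
        have hle : key r ≤ key y := by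
          rcases List.mem_cons.mp hrm with h1 | h1
          · exact le_of_eq (by rw [h1])
          · exact hy r h1
        simp [if_pos (lt_of_le_of_lt hle h)]
    · simp only [PySem.List.insertBy, decide_eq_true_eq, if_neg h]
      cases hPy : P y with
      | true =>
        rw [List.find?_cons_of_pos (h := hPy), List.find?_cons_of_pos (h := hPy)]
        simp [if_neg h]
      | false =>
        rw [List.find?_cons_of_neg (h := by simp [hPy]), List.find?_cons_of_neg (h := by simp [hPy])]
        exact ih ht

-- first P-element of the stable descending sort = strict-'>' running argmax over the original order
theorem pvFind_sorted_eq_argmax {α : Type} (key : α → Int) (P : α → Bool) (xs : List α) :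
    (PySem.List.sorted xs key true).find? P =
      xs.foldl (fun acc x => if P x && pvTest key acc x then some x else acc) none := by
  induction xs using List.reverseRecOn with
  | nil => simp [PySem.List.sorted]
  | append_singleton xs x ih =>
    rw [PySem.List.sorted_rev_eq_foldl_insertBy, List.foldl_append, List.foldl_append,
        ← PySem.List.sorted_rev_eq_foldl_insertBy]
    simp only [List.foldl_cons, List.foldl_nil]
    rw [← ih]
    cases hx : P x with
    | false =>
      rw [pvFind_insertBy_neg _ _ _ hx]
      simp
    | true =>
      rw [pvFind_insertBy_pos key P x hx _ (PySem.List.sorted_pairwise_rev xs key)]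
      cases hr : (PySem.List.sorted xs key true).find? P with
      | none => simp [pvTest]
      | some r =>
        by_cases h : key r < key x
        · simp [pvTest, h]
        · simp [pvTest, h]

-- A's final scan is find? with pvP
theorem pvScanA_eq_find (pattern : String) (l : List (Int × Int)) :
    pvScanA pattern l =
      match l.find? (pvP pattern) with
      | some p => String.ofList [index_to_letter p.1]
      | none => "" := by
  induction l with
  | nil => simp [pvScanA]
  | cons p rest ih =>
    simp only [pvScanA, List.find?]
    cases hb : PySem.Chars.isIn [index_to_letter p.1] pattern.toList with
    | true => simp [pvP, PySem.Str.isIn, hb, ih]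
    | false => simp [pvP, PySem.Str.isIn, hb]

-- the argmax fold over the enumerated table tracks B's selection fold over the index list
theorem pvSel_fold (counts : List Int) (pattern : String) (l : List Nat) : ∀ (accB : Option Int),
    l.foldl (fun acc (j : Nat) =>
        if pvP pattern ((j : Int), counts.getD j 0) &&
           pvTest (fun p => p.2) acc ((j : Int), counts.getD j 0)
        then some ((j : Int), counts.getD j 0) else acc)
      (accB.map (fun b => (b, PySem.List.pyGetD counts b 0)))
    = ((l.map (fun j => (j : Int))).foldl (pvStepSel counts pattern) accB).map
        (fun b => (b, PySem.List.pyGetD counts b 0)) := by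
  induction l with
  | nil => intro accB; simp
  | cons j t ih =>
    intro accB
    simp only [List.foldl_cons]
    have hstep :
        (if pvP pattern ((j : Int), counts.getD j 0) &&
            pvTest (fun p => p.2) (accB.map (fun b => (b, PySem.List.pyGetD counts b 0))) ((j : Int), counts.getD j 0)
         then some ((j : Int), counts.getD j 0)
         else accB.map (fun b => (b, PySem.List.pyGetD counts b 0)))
        = (pvStepSel counts pattern accB (j : Int)).map (fun b => (b, PySem.List.pyGetD counts b 0)) := by
      cases accB with
      | none =>
        simp only [Option.map_none, pvStepSel, pvP, pvTest]
        split_ifs with h <;> simp_all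
      | some b =>
        simp only [Option.map_some, pvStepSel, pvP, pvTest, PySem.List.pyGetD_natCast]
        split_ifs with h <;> simp_all
    rw [hstep]; exact ih _

theorem pvRange26 : PySem.List.pyRange 0 26 1 = (List.range 26).map (fun j => (j : Int)) := by
  decide

-- ===== VERDICT (by name: the statement is the Claim_ definition above) =====
theorem choose_letter_spec : Claim_equal_choose_letter := by
  intro words pattern _ _
  unfold Spec_choose_letter
  simp only [choose_letter, choose_letter_alt]
  obtain ⟨hlen, htbl⟩ :=
    pvRel_foldWords words _ _ pvRel_init
  rw [htbl, pvScanA_eq_find, pvFind_sorted_eq_argmax (fun p => p.2) (pvP pattern), List.foldl_map]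
  have := pvSel_fold (words.foldl (fun t w => w.toList.foldl pvStepB t) (PySem.List.pyRepeat [(0:Int)] 26))
            pattern (List.range 26) none
  simp only [Option.map_none] at this
  refine (congrArg (fun o : Option (Int × Int) =>
      (match o with
       | some p => String.ofList [index_to_letter p.1]
       | none => "" : String)) this).trans ?_
  rw [pvRange26]
  cases ((List.range 26).map (fun j => (j : Int))).foldl
      (pvStepSel (words.foldl (fun t w => w.toList.foldl pvStepB t) (PySem.List.pyRepeat [(0:Int)] 26)) pattern) none with
  | none => rfl
  | some b => rfl
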